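-- pv_equiv track=rewrite | github.com/cchen0800/kpi-accountability-dashboard | api/pipeline.py | _repair_generated_updates
-- ===== SOURCE A (Python) =====
-- WEEKDAYS = ["monday", "tuesday", "wednesday", "thursday", "friday"]
--
-- def _repair_generated_updates(updates, expected_days):
--     by_day = {u["day"]: u["content"] for u in updates if u.get("day") in WEEKDAYS and u.get("content")}
--     repaired = []
--     for day in expected_days:
--         content = by_day.get(day)
--         if not content:
--             content = "Quick update: made steady progress on core KPI work today and stayed responsive to stakeholders."
--         repaired.append({"day": day, "content": content})
--     return repaired
-- ===== SOURCE B (Python) =====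
-- WEEKDAYS = ["monday", "tuesday", "wednesday", "thursday", "friday"]
--
-- _DEFAULT = "Quick update: made steady progress on core KPI work today and stayed responsive to stakeholders."
--
-- def _repair_generated_updates(updates, expected_days):
--     repaired = []
--     for day in expected_days:
--         content = _DEFAULT
--         if day in WEEKDAYS:
--             for u in reversed(updates):
--                 if u.get("day") == day and u.get("content"):
--                     content = u["content"]
--                     break
--         repaired.append({"day": day, "content": content})
--     return repaired
-- ===== Notes on version B (the rewrite author's own statement) =====
-- stated objective: alternative
-- what changed: Drops the precomputed by_day dict: for each expected day B scans the updates list from the end and takes the first qualifying entry (which equals the dict's last-write-wins value), defaulting otherwise.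
import Mathlib
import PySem

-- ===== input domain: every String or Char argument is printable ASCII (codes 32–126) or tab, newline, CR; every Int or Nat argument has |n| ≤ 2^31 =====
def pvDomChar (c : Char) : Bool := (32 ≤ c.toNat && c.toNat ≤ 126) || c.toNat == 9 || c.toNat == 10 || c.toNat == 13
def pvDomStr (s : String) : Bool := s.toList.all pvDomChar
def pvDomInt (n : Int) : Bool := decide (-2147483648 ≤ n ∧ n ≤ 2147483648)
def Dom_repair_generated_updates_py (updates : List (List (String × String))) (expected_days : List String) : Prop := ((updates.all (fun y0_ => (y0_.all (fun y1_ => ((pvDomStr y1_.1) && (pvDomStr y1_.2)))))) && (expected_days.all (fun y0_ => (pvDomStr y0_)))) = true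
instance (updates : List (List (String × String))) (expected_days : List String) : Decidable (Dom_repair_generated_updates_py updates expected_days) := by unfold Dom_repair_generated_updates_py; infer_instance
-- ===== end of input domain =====

-- B drops A's precomputed by_day dict and instead scans updates from the end per expected day
-- (first qualifying hit = the dict's last-write-wins value); alternative decomposition, same results.


def pvWeekdays : List String := ["monday", "tuesday", "wednesday", "thursday", "friday"]

def pvDefault : String := "Quick update: made steady progress on core KPI work today and stayed responsive to stakeholders."

-- ===== PORT A =====
-- the dict-comprehension filter + insert step, one update at a time
def pvStepA (d : PySem.Dict String String) (u : List (String × String)) : PySem.Dict String String :=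
  let du : PySem.Dict String String := PySem.Dict.mk u
  match du.get? "day", du.get? "content" with
  | some dy, some c => if dy ∈ pvWeekdays ∧ c ≠ "" then d.insert dy c else d
  | _, _ => d

def repair_generated_updates_py (updates : List (List (String × String))) (expected_days : List String) : List (List (String × String)) :=
  let by_day := updates.foldl pvStepA PySem.Dict.empty
  expected_days.map (fun day =>
    let content :=
      match by_day.get? day with
      | some c => if c = "" then pvDefault else c  -- `if not content` (None or empty)
      | none => pvDefault
    [("day", day), ("content", content)])

-- ===== PORT B =====
-- Source B's inner loop over reversed(updates): first qualifying hit, else the default sentence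
def pvScanB (us : List (List (String × String))) (day : String) : String :=
  match us with
  | [] => pvDefault
  | u :: rest =>
    let du : PySem.Dict String String := PySem.Dict.mk u
    if du.get? "day" = some day ∧ (du.get? "content").getD "" ≠ "" then (du.get? "content").getD ""
    else pvScanB rest day

def repair_generated_updates_py_alt (updates : List (List (String × String))) (expected_days : List String) : List (List (String × String)) :=
  expected_days.map (fun day =>
    let content := if day ∈ pvWeekdays then pvScanB updates.reverse day else pvDefault
    [("day", day), ("content", content)])

-- ===== PRECONDITION & SPEC =====
def Spec_repair_generated_updates_py (updates : List (List (String × String))) (expected_days : List String) (out : List (List (String × String))) : Prop := out = repair_generated_updates_py_alt updates expected_days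
instance (updates : List (List (String × String))) (expected_days : List String) (out : List (List (String × String))) : Decidable (Spec_repair_generated_updates_py updates expected_days out) := by unfold Spec_repair_generated_updates_py; infer_instance

-- ===== CLAIM (what is proved, stated in full; the proofs are below) =====
def Claim_equal_repair_generated_updates_py : Prop := ∀ (updates : List (List (String × String))) (expected_days : List String), Dom_repair_generated_updates_py updates expected_days → Spec_repair_generated_updates_py updates expected_days (repair_generated_updates_py updates expected_days)

-- ===== LEMMAS AND PROOFS =====

-- option-valued version of B's scan, for relating it to A's dict
def pvFindC (us : List (List (String × String))) (day : String) : Option String :=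
  match us with
  | [] => none
  | u :: rest =>
    let du : PySem.Dict String String := PySem.Dict.mk u
    if du.get? "day" = some day ∧ (du.get? "content").getD "" ≠ "" then some ((du.get? "content").getD "")
    else pvFindC rest day

lemma pvScanB_eq_findC (us : List (List (String × String))) (day : String) :
    pvScanB us day = match pvFindC us day with | some c => c | none => pvDefault := by
  induction us with
  | nil => rfl
  | cons u rest ih =>
    simp only [pvScanB, pvFindC]
    split_ifs with h
    · rfl
    · exact ih

lemma pvFindC_append (l₁ l₂ : List (List (String × String))) (day : String) :
    pvFindC (l₁ ++ l₂) day = match pvFindC l₁ day with | some c => some c | none => pvFindC l₂ day := by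
  induction l₁ with
  | nil => rfl
  | cons u rest ih =>
    simp only [pvFindC, List.cons_append]
    split_ifs with h
    · rfl
    · exact ih

lemma pvFindC_ne_empty {us : List (List (String × String))} {day c : String}
    (h : pvFindC us day = some c) : c ≠ "" := by
  induction us with
  | nil => simp [pvFindC] at h
  | cons u rest ih =>
    simp only [pvFindC] at h
    split_ifs at h with hc
    · cases h; exact hc.2
    · exact ih h

-- the dict built by A's comprehension, looked up at a weekday, is B's reversed scan
lemma foldl_get?_eq (day : String) (hday : day ∈ pvWeekdays) :
    ∀ (us : List (List (String × String))) (d : PySem.Dict String String),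
    (us.foldl pvStepA d).get? day =
      match pvFindC us.reverse day with | some c => some c | none => d.get? day := by
  intro us
  induction us with
  | nil => intro d; rfl
  | cons u rest ih =>
    intro d
    simp only [List.foldl_cons, List.reverse_cons]
    rw [ih (pvStepA d u), pvFindC_append]
    cases hfind : pvFindC rest.reverse day with
    | some c => rfl
    | none =>
      simp only []
      -- remaining: (pvStepA d u).get? day = match pvFindC [u] day with …
      simp only [pvStepA, pvFindC]
      cases hdy : (PySem.Dict.mk u : PySem.Dict String String).get? "day" with
      | none => simp
      | some dy =>
        cases hc : (PySem.Dict.mk u : PySem.Dict String String).get? "content" with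
        | none => simp
        | some c =>
          simp only [Option.getD_some]
          by_cases hq : dy ∈ pvWeekdays ∧ c ≠ ""
          · rw [if_pos hq, PySem.Dict.get?_insert]
            by_cases hde : dy = day
            · subst hde; simp [hq.2]
            · rw [if_neg (fun h => hde h.symm)]
              have : ¬ (some dy = some day ∧ c ≠ "") := fun h => hde (Option.some.inj h.1)
              rw [if_neg this]
          · rw [if_neg hq]
            have : ¬ (some dy = some day ∧ c ≠ "") := by
              rintro ⟨h1, h2⟩
              exact hq ⟨(Option.some.inj h1) ▸ hday, h2⟩
            rw [if_neg this]

-- if the looked-up day is not a weekday, A's dict never holds it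
lemma foldl_get?_not_weekday (day : String) (hday : day ∉ pvWeekdays) :
    ∀ (us : List (List (String × String))) (d : PySem.Dict String String),
    (us.foldl pvStepA d).get? day = d.get? day := by
  intro us
  induction us with
  | nil => intro d; rfl
  | cons u rest ih =>
    intro d
    simp only [List.foldl_cons]
    rw [ih (pvStepA d u)]
    simp only [pvStepA]
    cases hdy : (PySem.Dict.mk u : PySem.Dict String String).get? "day" with
    | none => rfl
    | some dy =>
      cases hc : (PySem.Dict.mk u : PySem.Dict String String).get? "content" with
      | none => rfl
      | some c =>
        simp only []
        split_ifs with hq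
        · exact PySem.Dict.get?_insert_of_ne _ _ (fun h => hday (h ▸ hq.1))
        · rfl

-- ===== VERDICT (by name: the statement is the Claim_ definition above) =====
theorem repair_generated_updates_py_spec : Claim_equal_repair_generated_updates_py := by
  intro updates expected_days _
  unfold Spec_repair_generated_updates_py repair_generated_updates_py repair_generated_updates_py_alt
  apply List.map_congr_left
  intro day _
  by_cases hday : day ∈ pvWeekdays
  · rw [if_pos hday, foldl_get?_eq day hday, pvScanB_eq_findC]
    cases hfind : pvFindC updates.reverse day with
    | some c => simp [pvFindC_ne_empty hfind]
    | none => simp [PySem.Dict.get?_empty]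
  · rw [if_neg hday, foldl_get?_not_weekday day hday, PySem.Dict.get?_empty]
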